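-- pv_equiv track=rewrite | github.com/tony-728/Algorithm | python/programmers/Lev1/과일장수.py | solution
-- ===== SOURCE A (Python) =====
-- def solution(k, m, score):
--     answer = 0
--     score_len = len(score)
--     score = sorted(score)
--
--     while score_len >= m:
--         answer += score[-m] * m
--         del score[-m:]
--         score_len -= m
--
--     return answer
-- ===== SOURCE B (Python) =====
-- def solution(k, m, score):
--     # Sort descending; every m-th element starting at index m-1 is the minimum
--     # of one full group of m apples, and each full group is sold for min * m.
--     s = sorted(score, reverse=True)
--     return m * sum(s[m - 1::m])
-- ===== Notes on version B (the rewrite author's own statement) =====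
-- stated objective: simpler
-- what changed: Replaces the destructive while-loop (repeatedly reading score[-m] and deleting the top m elements of an ascending-sorted list) by one strided slice over the descending-sorted list: answer = m * sum(s[m-1::m]); no mutation, no loop.
import Mathlib
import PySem

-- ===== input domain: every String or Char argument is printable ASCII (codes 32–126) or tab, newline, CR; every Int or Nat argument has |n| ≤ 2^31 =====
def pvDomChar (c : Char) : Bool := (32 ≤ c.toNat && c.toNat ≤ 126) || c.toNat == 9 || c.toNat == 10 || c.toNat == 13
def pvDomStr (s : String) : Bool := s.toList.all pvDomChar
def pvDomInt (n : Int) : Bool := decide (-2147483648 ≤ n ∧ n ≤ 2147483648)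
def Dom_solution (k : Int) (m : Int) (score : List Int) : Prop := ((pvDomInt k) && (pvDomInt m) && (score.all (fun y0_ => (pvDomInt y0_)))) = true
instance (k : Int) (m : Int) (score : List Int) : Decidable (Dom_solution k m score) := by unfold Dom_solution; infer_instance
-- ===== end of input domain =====

-- B replaces A's destructive while-loop over an ascending sort by a single strided
-- slice over the descending sort: m * sum(s[m-1::m]) (objective: simpler; return value only).

-- ===== PORT A =====
-- A's while-loop; fuel = initial length bounds the iteration count (each pass removes
-- m ≥ 1 elements on Pre_; for m ≤ 0 the Python loop raises/diverges, outside Pre_).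
def solLoop (m : Int) : Nat → Int → Int → List Int → Int
  | 0, answer, _, _ => answer
  | fuel + 1, answer, scoreLen, score =>
    if m ≤ scoreLen then
      solLoop m fuel (answer + (PySem.List.pyGet? score (-m)).getD 0 * m) (scoreLen - m)
        (PySem.List.slice score none (some (-m)))
    else answer

def solution (k : Int) (m : Int) (score : List Int) : Int :=
  solLoop m score.length 0 (score.length : Int) (PySem.List.sorted score (fun x => x) false)

-- ===== PORT B =====
-- Source B: s = sorted(score, reverse=True); return m * sum(s[m-1::m]).
-- slice? is none only for step m = 0 (Python raises ValueError there, outside Pre_).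
def solution_alt (k : Int) (m : Int) (score : List Int) : Int :=
  let s := PySem.List.sorted score (fun x => x) true
  m * ((PySem.List.slice? s (some (m - 1)) none m).getD []).sum

-- ===== PRECONDITION & SPEC =====
-- Pre_ excludes exactly m ≤ 0, where A never returns: m = 0 hits score[-0] = score[0]
-- after del score[0:] (IndexError), and m < 0 grows score_len each pass until
-- score[-m] is out of range (IndexError).
def Pre_solution (k : Int) (m : Int) (score : List Int) : Prop := 1 ≤ m
instance (k : Int) (m : Int) (score : List Int) : Decidable (Pre_solution k m score) := by unfold Pre_solution; infer_instance
def pvWitness_solution : Int × Int × List Int := (4, 2, [1, 2, 3, 1, 2])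
def Spec_solution (k : Int) (m : Int) (score : List Int) (out : Int) : Prop := out = solution_alt k m score
instance (k : Int) (m : Int) (score : List Int) (out : Int) : Decidable (Spec_solution k m score out) := by unfold Spec_solution; infer_instance

-- ===== CLAIM (what is proved, stated in full; the proofs are below) =====
def Claim_equal_solution : Prop := ∀ (k : Int) (m : Int) (score : List Int), Dom_solution k m score → Pre_solution k m score → Spec_solution k m score (solution k m score)

-- ===== LEMMAS AND PROOFS =====

-- the strided picks of B, as a function of the descending list
def picks (m : Int) (d : List Int) : List Int :=
  (PySem.List.slice? d (some (m - 1)) none m).getD []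

theorem picks_closed {m : Int} (d : List Int) (hm : 1 ≤ m) :
    picks m d = (List.range (((d.length : Int) / m)).toNat).filterMap
      (fun k : Nat => d[((m - 1) + m * (k : Int)).toNat]?) := by
  unfold picks PySem.List.slice? PySem.List.sliceIndices
  have h0 : ¬ (m = 0) := by omega
  have h1 : ¬ (m < 0) := by omega
  have h2 : ¬ (m - 1 < 0) := by omega
  simp only [h0, h1, h2, if_false, hm, if_pos (by omega : (0:Int) < m), Option.getD_some]
  by_cases hle : m ≤ (d.length : Int)
  · have hmin : min (m - 1) (d.length : Int) = m - 1 := by omega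
    rw [hmin, if_pos (by omega : m - 1 < (d.length : Int))]
    have : (d.length : Int) - (m - 1) + m - 1 = (d.length : Int) := by ring
    rw [this]
  · have hmin : min (m - 1) (d.length : Int) = (d.length : Int) := by omega
    rw [hmin, if_neg (by omega : ¬ ((d.length : Int) < (d.length : Int)))]
    have : (d.length : Int) / m = 0 := Int.ediv_eq_zero_of_lt (by omega) (by omega)
    rw [this]
    simp

theorem picks_nil {m : Int} (d : List Int) (hm : 1 ≤ m) (h : (d.length : Int) < m) :
    picks m d = [] := by
  rw [picks_closed d hm]
  have : (d.length : Int) / m = 0 := Int.ediv_eq_zero_of_lt (by omega) (by omega)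
  simp [this]

theorem picks_cons {m : Int} (d : List Int) (hm : 1 ≤ m) (h : m ≤ (d.length : Int)) :
    picks m d = (d[(m - 1).toNat]?).getD 0 :: picks m (d.drop m.toNat) := by
  rw [picks_closed d hm, picks_closed (d.drop m.toNat) hm]
  have hq : (1:Int) ≤ (d.length : Int) / m := by
    rw [Int.le_ediv_iff_mul_le (by omega)]; omega
  have hlen : ((d.drop m.toNat).length : Int) = (d.length : Int) - m := by
    simp [List.length_drop]; omega
  have hq2 : ((d.drop m.toNat).length : Int) / m = (d.length : Int) / m - 1 := by
    rw [hlen]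
    have : (d.length : Int) - m = (d.length : Int) + (-1) * m := by ring
    rw [this, Int.add_mul_ediv_right _ _ (by omega : m ≠ 0)]; ring
  obtain ⟨n, hn⟩ : ∃ n : Nat, ((d.length : Int) / m).toNat = n + 1 :=
    ⟨((d.length : Int) / m).toNat - 1, by omega⟩
  rw [hn, hq2]
  have : (((d.length : Int) / m - 1)).toNat = n := by omega
  rw [this, List.range_succ_eq_map, List.filterMap_cons, List.filterMap_map]
  have hhead : ((m : Int) - 1 + m * ((0:Nat) : Int)).toNat = (m - 1).toNat := by simp
  rw [hhead]
  have hsome : d[(m - 1).toNat]? = some (d[(m-1).toNat]'(by omega)) := by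
    rw [List.getElem?_eq_getElem]
  rw [hsome]
  simp only [Option.getD_some]
  congr 1
  apply List.filterMap_congr
  intro k _
  have hk : (0:Int) ≤ m * (k : Int) := by positivity
  simp only [Function.comp]
  rw [List.getElem?_drop]
  congr 1
  have : (m - 1 + m * ((Nat.succ k : Nat) : Int)) = (m - 1 + m * (k:Int)) + m := by
    push_cast; ring
  rw [this]
  omega

theorem solLoop_eq_picks {m : Int} (hm : 1 ≤ m) :
    ∀ (fuel : Nat) (d : List Int) (answer : Int), d.length ≤ fuel →
      solLoop m fuel answer (d.length : Int) d.reverse = answer + m * (picks m d).sum := by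
  intro fuel
  induction fuel with
  | zero =>
    intro d answer hle
    have hd : d = [] := by cases d <;> simp_all
    subst hd
    simp [solLoop, picks_nil [] hm (by omega)]
  | succ fuel ih =>
    intro d answer hle
    by_cases hcase : m ≤ (d.length : Int)
    · have hget : (PySem.List.pyGet? d.reverse (-m)).getD 0 = (d[(m - 1).toNat]?).getD 0 := by
        have hidx : PySem.List.pyIdx? d.reverse.length (-m) = some (d.length - m.toNat) := by
          simp only [List.length_reverse, PySem.List.pyIdx?]
          rw [if_neg (by omega), if_pos (by omega)]
          congr 1; omega
        simp only [PySem.List.pyGet?, hidx, Option.bind_some]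
        rw [List.getElem?_reverse (by omega)]
        congr 2; omega
      have hslice : PySem.List.slice d.reverse none (some (-m)) = (d.drop m.toNat).reverse := by
        have hmn : -m = -((m.toNat : Nat) : Int) := by omega
        rw [hmn, PySem.List.slice_to_neg_natCast _ _ (by omega)]
        have h2 := congrArg List.reverse (List.reverse_take (l := d.reverse) (i := d.length - m.toNat))
        simp only [List.reverse_reverse, List.length_reverse] at h2
        have h3 : d.length - (d.length - m.toNat) = m.toNat := by omega
        rw [h3] at h2
        rw [List.length_reverse, ← h2]
      rw [show solLoop m (fuel + 1) answer (d.length : Int) d.reverse =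
          solLoop m fuel (answer + (PySem.List.pyGet? d.reverse (-m)).getD 0 * m)
            ((d.length : Int) - m) (PySem.List.slice d.reverse none (some (-m))) from by
        simp [solLoop, hcase]]
      rw [hget, hslice]
      have hlen' : ((d.length : Int) - m) = (((d.drop m.toNat).length : Nat) : Int) := by
        simp [List.length_drop]; omega
      rw [hlen', ih (d.drop m.toNat) _ (by simp [List.length_drop]; omega)]
      rw [picks_cons d hm hcase]
      simp [List.sum_cons]; ring
    · rw [show solLoop m (fuel + 1) answer (d.length : Int) d.reverse = answer from by
        simp [solLoop, hcase]]
      rw [picks_nil d hm (by omega)]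
      simp

theorem desc_eq_reverse_asc (score : List Int) :
    PySem.List.sorted score (fun x => x) true = (PySem.List.sorted score (fun x => x) false).reverse := by
  apply List.eq_of_perm_of_sorted (le := fun a b : Int => b ≤ a)
  · intro a b _ _ h1 h2; omega
  · exact PySem.List.sorted_pairwise_rev score (fun x => x)
  · rw [List.pairwise_reverse]
    exact PySem.List.sorted_pairwise score (fun x => x)
  · exact ((PySem.List.sorted_perm score (fun x : Int => x) true).trans
      (PySem.List.sorted_perm score (fun x : Int => x) false).symm).trans
      (List.reverse_perm _).symm

-- ===== VERDICT (by name: the statement is the Claim_ definition above) =====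
theorem solution_spec : Claim_equal_solution := by
  intro k m score _ hm
  unfold Spec_solution solution solution_alt
  rw [desc_eq_reverse_asc]
  have hmain := solLoop_eq_picks hm (PySem.List.sorted score (fun x => x) false).reverse.length
      ((PySem.List.sorted score (fun x => x) false).reverse) 0 (le_refl _)
  rw [List.reverse_reverse] at hmain
  have hlen : score.length = (PySem.List.sorted score (fun x => x) false).reverse.length := by
    simpa using ((PySem.List.sorted_perm score (fun x : Int => x) false).length_eq).symm
  rw [hlen, hmain]
  simp [picks]
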